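-- pv_equiv track=rewrite | github.com/paulklemstine/factor | pyth_research_modular_forms.py | tree_nodes
-- ===== SOURCE A (Python) =====
-- def tree_nodes(depth):
--     """Generate all (m,n) at given depth in Pythagorean tree."""
--     nodes = [(2, 1)]
--     for d in range(depth):
--         new_nodes = []
--         for m, n in nodes:
--             new_nodes.append((2*m - n, m))   # B1
--             new_nodes.append((2*m + n, m))   # B2
--             new_nodes.append((m + 2*n, n))   # B3
--         nodes = new_nodes
--     return nodes
-- ===== SOURCE B (Python) =====
-- def tree_nodes(depth):
--     """Generate all (m,n) at given depth in Pythagorean tree."""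
--     result = []
--     stack = [(2, 1, depth)]
--     while stack:
--         m, n, d = stack.pop()
--         if d <= 0:
--             result.append((m, n))
--         elif d == 1:
--             result.append((2*m - n, m))   # B1
--             result.append((2*m + n, m))   # B2
--             result.append((m + 2*n, n))   # B3
--         else:
--             d -= 1
--             stack.append((m + 2*n, n, d))   # pushed last-first so B1 is popped first
--             stack.append((2*m + n, m, d))
--             stack.append((2*m - n, m, d))
--     return result
-- ===== Notes on version B (the rewrite author's own statement) =====
-- stated objective: alternative
-- what changed: Replaced the breadth-first level-by-level list rebuilding with an explicit-stack depth-first traversal that emits each leaf (and the whole bottom level per node) directly into the result; since the ternary tree is complete, DFS leaf order equals the BFS leaf order.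
import Mathlib
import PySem

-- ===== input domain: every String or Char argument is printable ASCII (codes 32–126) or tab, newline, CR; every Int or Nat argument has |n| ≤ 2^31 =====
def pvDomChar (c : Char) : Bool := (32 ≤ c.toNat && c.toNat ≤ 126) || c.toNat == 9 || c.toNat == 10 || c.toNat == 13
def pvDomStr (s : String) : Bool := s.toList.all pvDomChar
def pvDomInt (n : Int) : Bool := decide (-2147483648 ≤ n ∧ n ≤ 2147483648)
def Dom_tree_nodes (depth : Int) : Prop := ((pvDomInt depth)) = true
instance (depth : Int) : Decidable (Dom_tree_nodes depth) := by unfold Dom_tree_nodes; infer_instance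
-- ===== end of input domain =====

-- B replaces A's breadth-first level rebuilding by an explicit-stack depth-first traversal (same leaves, same order).


-- ===== PORT A =====
-- inner loop: for m, n in nodes: append the three children, in order, to new_nodes
-- (the obvious structural recursion producing the same list head-first)
def pvInner (nodes : List (Int × Int)) : List (Int × Int) :=
  match nodes with
  | [] => []
  | p :: rest =>
      (2 * p.1 - p.2, p.1)     -- B1
        :: (2 * p.1 + p.2, p.1)  -- B2
        :: (p.1 + 2 * p.2, p.2)  -- B3
        :: pvInner rest

-- outer loop: for d in range(depth): nodes = new_nodes
def tree_nodes (depth : Int) : List (Int × Int) :=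
  (PySem.List.pyRange 0 depth 1).foldl (fun nodes _ => pvInner nodes) [(2, 1)]

-- ===== PORT B =====
-- termination measure for the DFS stack loop: each popped frame of fuel d weighs 4^(d.toNat+1)
def pvMeasure (stack : List (Int × Int × Int)) : Nat :=
  (stack.map (fun t => 4 ^ (t.2.2.toNat + 1))).sum

-- the while loop over the explicit stack; the head of the list is the top of Python's stack
-- (Python pushes B3, B2, B1 so that B1 is popped first); result.append is Array.push
def pvDfs (stack : List (Int × Int × Int)) (result : Array (Int × Int)) : Array (Int × Int) :=
  match stack with
  | [] => result
  | (m, n, d) :: rest =>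
      if d ≤ 0 then
        pvDfs rest (result.push (m, n))
      else if d = 1 then
        pvDfs rest (((result.push (2 * m - n, m)).push (2 * m + n, m)).push (m + 2 * n, n))
      else
        pvDfs ((2 * m - n, m, d - 1) :: (2 * m + n, m, d - 1) :: (m + 2 * n, n, d - 1) :: rest)
          result
termination_by pvMeasure stack
decreasing_by
  · show pvMeasure rest < pvMeasure ((m, n, d) :: rest)
    have h4 : 0 < 4 ^ (d.toNat + 1) := Nat.pow_pos (by omega)
    simp only [pvMeasure, List.map_cons, List.sum_cons]
    omega
  · show pvMeasure rest < pvMeasure ((m, n, d) :: rest)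
    have h4 : 0 < 4 ^ (d.toNat + 1) := Nat.pow_pos (by omega)
    simp only [pvMeasure, List.map_cons, List.sum_cons]
    omega
  · rename_i hd0 hd1
    show pvMeasure ((2 * m - n, m, d - 1) :: (2 * m + n, m, d - 1) :: (m + 2 * n, n, d - 1) :: rest)
        < pvMeasure ((m, n, d) :: rest)
    simp only [pvMeasure, List.map_cons, List.sum_cons]
    have hd : (2 : Int) ≤ d := by omega
    have ht : (d - 1).toNat + 1 = d.toNat := by omega
    rw [ht]
    have hlt : 4 ^ d.toNat + (4 ^ d.toNat + 4 ^ d.toNat) < 4 ^ (d.toNat + 1) := by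
      rw [Nat.pow_succ]
      have : 0 < 4 ^ d.toNat := Nat.pow_pos (by omega)
      omega
    omega

def tree_nodes_alt (depth : Int) : List (Int × Int) :=
  (pvDfs [(2, 1, depth)] #[]).toList

-- ===== PRECONDITION & SPEC =====
def Spec_tree_nodes (depth : Int) (out : List (Int × Int)) : Prop := out = tree_nodes_alt depth
instance (depth : Int) (out : List (Int × Int)) : Decidable (Spec_tree_nodes depth out) := by unfold Spec_tree_nodes; infer_instance

-- ===== CLAIM (what is proved, stated in full; the proofs are below) =====
def Claim_equal_tree_nodes : Prop := ∀ (depth : Int), Dom_tree_nodes depth → Spec_tree_nodes depth (tree_nodes depth)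

-- ===== LEMMAS AND PROOFS =====

-- the three children of a node, as one list
def pvChildren (p : Int × Int) : List (Int × Int) :=
  [(2 * p.1 - p.2, p.1), (2 * p.1 + p.2, p.1), (p.1 + 2 * p.2, p.2)]

-- specification helper: the leaves of the complete ternary subtree below `node` after `k` levels
def treeRec (node : Int × Int) (k : Nat) : List (Int × Int) :=
  match k with
  | 0 => [node]
  | Nat.succ k' =>
      treeRec (2 * node.1 - node.2, node.1) k'
        ++ treeRec (2 * node.1 + node.2, node.1) k'
        ++ treeRec (node.1 + 2 * node.2, node.2) k'

-- pointwise-equal step functions give equal folds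
theorem pv_foldl_congr {α β : Type} (l : List β) (f g : α → β → α) (init : α)
    (h : ∀ acc x, f acc x = g acc x) : l.foldl f init = l.foldl g init := by
  induction l generalizing init with
  | nil => rfl
  | cons x xs ih => simp only [List.foldl_cons, h, ih]

-- A's inner loop is a flatMap over the children
theorem pv_inner_eq (ns : List (Int × Int)) : pvInner ns = ns.flatMap pvChildren := by
  induction ns with
  | nil => rfl
  | cons p rest ih => simp [pvInner, pvChildren, ih]

-- expanding one more level at the leaves equals one more level at the root
theorem treeRec_succ_leaf (k : Nat) (node : Int × Int) :
    treeRec node (k + 1) = (treeRec node k).flatMap pvChildren := by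
  induction k generalizing node with
  | zero => simp [treeRec, pvChildren]
  | succ k ih =>
      have h : treeRec node (k + 1 + 1)
          = treeRec (2 * node.1 - node.2, node.1) (k + 1)
            ++ treeRec (2 * node.1 + node.2, node.1) (k + 1)
            ++ treeRec (node.1 + 2 * node.2, node.2) (k + 1) := rfl
      have h' : treeRec node (k + 1)
          = treeRec (2 * node.1 - node.2, node.1) k
            ++ treeRec (2 * node.1 + node.2, node.1) k
            ++ treeRec (node.1 + 2 * node.2, node.2) k := rfl
      rw [h, ih, ih, ih, h', List.flatMap_append, List.flatMap_append]

-- BFS iteration from any frontier equals the subtree leaves of each frontier node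
theorem pv_bfs_eq (k : Nat) (ns : List (Int × Int)) :
    (List.range k).foldl (fun nodes (_ : Nat) => nodes.flatMap pvChildren) ns
      = ns.flatMap (fun node => treeRec node k) := by
  induction k generalizing ns with
  | zero => simp [treeRec]
  | succ k ih =>
      rw [List.range_succ, List.foldl_append, ih]
      simp only [List.foldl_cons, List.foldl_nil]
      rw [List.flatMap_assoc]
      congr 1
      funext node
      exact (treeRec_succ_leaf k node).symm

-- the stack loop emits exactly the subtree leaves of each stack frame, top frame first
theorem pvDfs_toList (stack : List (Int × Int × Int)) (result : Array (Int × Int)) :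
    (pvDfs stack result).toList
      = result.toList ++ stack.flatMap (fun t => treeRec (t.1, t.2.1) t.2.2.toNat) := by
  fun_induction pvDfs stack result with
  | case1 arr => simp
  | case2 arr m n d rest hd ih =>
      have h0 : d.toNat = 0 := by omega
      rw [ih]
      simp [h0, treeRec, Array.toList_push]
  | case3 arr m n rest hd ih =>
      rw [ih]
      simp [treeRec, Array.toList_push]
  | case4 arr m n d rest hd0 hd1 ih =>
      have ht : d.toNat = (d - 1).toNat + 1 := by omega
      rw [ih]
      simp only [List.flatMap_cons]
      have hu : treeRec (m, n) d.toNat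
          = treeRec (2 * m - n, m) (d - 1).toNat
            ++ treeRec (2 * m + n, m) (d - 1).toNat
            ++ treeRec (m + 2 * n, n) (d - 1).toNat := by
        rw [ht]; rfl
      simp [hu]

-- ===== VERDICT (by name: the statement is the Claim_ definition above) =====
theorem tree_nodes_spec : Claim_equal_tree_nodes := by
  intro depth _
  show tree_nodes depth = tree_nodes_alt depth
  unfold tree_nodes tree_nodes_alt
  rw [PySem.List.pyRange_one 0 depth]
  rw [List.foldl_map]
  have hcongr :
      (List.range (depth - 0).toNat).foldl (fun nodes (_ : Nat) => pvInner nodes) [(2, 1)]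
      = (List.range (depth - 0).toNat).foldl (fun nodes (_ : Nat) => nodes.flatMap pvChildren) [(2, 1)] :=
    pv_foldl_congr _ _ _ _ (fun acc _ => pv_inner_eq acc)
  rw [hcongr, pv_bfs_eq, pvDfs_toList]
  simp
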